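-- pv_equiv track=rewrite | github.com/TheDARTProject/thedartproject.github.io | tools/modules/temp_tool_1.py | update_json
-- ===== SOURCE A (Python) =====
-- def update_json(data):
--     for account, details in data.items():
--         # Add ACCOUNT_TYPE if not present
--         if "ACCOUNT_TYPE" not in details:
--             index = list(details.keys()).index("ACCOUNT_STATUS") + 1
--             details = insert_field(details, index, "ACCOUNT_TYPE", "User Accounts")
--
--         # Add FOUND_ON_SERVER if not present
--         if "FOUND_ON_SERVER" not in details:
--             index = list(details.keys()).index("FOUND_ON") + 1
--             details = insert_field(details, index, "FOUND_ON_SERVER", "ANONYMOUS_SERVER_2")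
--
--         # Set ACCOUNT_STATUS to COMPROMISED if empty
--         if "ACCOUNT_STATUS" in details and details["ACCOUNT_STATUS"].strip() == "":
--             details["ACCOUNT_STATUS"] = "COMPROMISED"
--
--         data[account] = details
--
--     return data
--
-- def insert_field(dictionary, index, key, value):
--     items = list(dictionary.items())
--     items.insert(index, (key, value))
--     return dict(items)
-- ===== SOURCE B (Python) =====
-- def update_json(data):
--     for account, details in data.items():
--         need_type = "ACCOUNT_TYPE" not in details
--         need_server = "FOUND_ON_SERVER" not in details
--         if need_type and "ACCOUNT_STATUS" not in details:
--             raise ValueError("'ACCOUNT_STATUS' is not in list")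
--         if need_server and "FOUND_ON" not in details:
--             raise ValueError("'FOUND_ON' is not in list")
--         items = []
--         for k, v in details.items():
--             if k == "ACCOUNT_STATUS" and v.strip() == "":
--                 v = "COMPROMISED"
--             items.append((k, v))
--             if need_type and k == "ACCOUNT_STATUS":
--                 items.append(("ACCOUNT_TYPE", "User Accounts"))
--             if need_server and k == "FOUND_ON":
--                 items.append(("FOUND_ON_SERVER", "ANONYMOUS_SERVER_2"))
--         data[account] = dict(items)
--     return data
-- ===== Notes on version B (the rewrite author's own statement) =====
-- stated objective: simpler
-- what changed: B rebuilds each details dict in a single ordered pass over its items, appending the missing default field immediately after its anchor key, instead of A's list(keys).index() position computation plus list-splice-and-rebuild (insert_field) per missing field; B raises A's ValueError up front when a needed anchor key is absent.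
import Mathlib
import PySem

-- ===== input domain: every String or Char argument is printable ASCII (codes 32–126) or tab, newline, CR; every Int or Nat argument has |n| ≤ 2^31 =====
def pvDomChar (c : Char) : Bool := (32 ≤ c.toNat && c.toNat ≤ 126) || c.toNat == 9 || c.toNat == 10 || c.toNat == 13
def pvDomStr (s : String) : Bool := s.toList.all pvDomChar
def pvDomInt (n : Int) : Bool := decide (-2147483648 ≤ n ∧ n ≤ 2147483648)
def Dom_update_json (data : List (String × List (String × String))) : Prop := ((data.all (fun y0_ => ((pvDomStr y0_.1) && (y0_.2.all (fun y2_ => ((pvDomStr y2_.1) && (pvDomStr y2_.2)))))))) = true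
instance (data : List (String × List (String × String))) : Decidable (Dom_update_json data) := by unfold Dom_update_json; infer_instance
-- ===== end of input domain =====

-- B rebuilds each details dict in one ordered pass (appending the two default fields right
-- after their anchor keys) instead of A's index computation + list splice per missing field.
-- Both A and B mutate `data` in place in Python (same mutation); the theorems are about the return value.

-- ===== PORT A =====
def insert_field (dictionary : PySem.Dict String String) (index : Int) (key : String) (value : String) : PySem.Dict String String :=
  PySem.Dict.ofList (PySem.List.insert dictionary.items index (key, value))

def updateDetailsA (details0 : PySem.Dict String String) : PySem.Dict String String :=
  let details1 :=
    if details0.contains "ACCOUNT_TYPE" then details0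
    else
      let index : Int := ((PySem.List.index? details0.keys "ACCOUNT_STATUS").getD 0 : Int) + 1
      insert_field details0 index "ACCOUNT_TYPE" "User Accounts"
  let details2 :=
    if details1.contains "FOUND_ON_SERVER" then details1
    else
      let index : Int := ((PySem.List.index? details1.keys "FOUND_ON").getD 0 : Int) + 1
      insert_field details1 index "FOUND_ON_SERVER" "ANONYMOUS_SERVER_2"
  if details2.contains "ACCOUNT_STATUS" && (PySem.Str.strip (details2.getD "ACCOUNT_STATUS" "") == "") then
    details2.insert "ACCOUNT_STATUS" "COMPROMISED"
  else details2

def update_json (data : List (String × List (String × String))) : List (String × List (String × String)) :=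
  data.map (fun p => (p.1, (updateDetailsA (PySem.Dict.ofList p.2)).items))

-- ===== PORT B =====
-- Source B first raises the same ValueError as A when a needed anchor key is missing
-- ("ACCOUNT_STATUS" / "FOUND_ON"); those inputs are exactly the ones Pre_update_json
-- excludes for A's raise, so the port covers only the returning branch.
def updateItemsB (details : List (String × String)) : List (String × String) :=
  let needType : Bool := !(details.any (fun p => p.1 == "ACCOUNT_TYPE"))
  let needServer : Bool := !(details.any (fun p => p.1 == "FOUND_ON_SERVER"))
  let items := details.foldl (fun items kv =>
      let v := if kv.1 == "ACCOUNT_STATUS" && PySem.Str.strip kv.2 == "" then "COMPROMISED" else kv.2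
      let items := items ++ [(kv.1, v)]
      let items := if needType && kv.1 == "ACCOUNT_STATUS" then items ++ [("ACCOUNT_TYPE", "User Accounts")] else items
      if needServer && kv.1 == "FOUND_ON" then items ++ [("FOUND_ON_SERVER", "ANONYMOUS_SERVER_2")] else items)
    []
  (PySem.Dict.ofList items).items

def update_json_alt (data : List (String × List (String × String))) : List (String × List (String × String)) :=
  data.map (fun p => (p.1, updateItemsB p.2))

-- ===== PRECONDITION & SPEC =====
-- Pre_ excludes (a) association lists whose outer key list or some inner key list has duplicate
-- keys — such a list does not denote a Python dict uniquely (Python collapses the duplicates),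
-- so A's value on the raw list is accidental — and (b) accounts missing both a default field and
-- its anchor key ("ACCOUNT_TYPE"/"ACCOUNT_STATUS", "FOUND_ON_SERVER"/"FOUND_ON"), on which A
-- raises ValueError.
def Pre_update_json (data : List (String × List (String × String))) : Prop :=
  (data.map Prod.fst).Nodup ∧
  ∀ p ∈ data,
    (p.2.map Prod.fst).Nodup ∧
    ("ACCOUNT_TYPE" ∈ p.2.map Prod.fst ∨ "ACCOUNT_STATUS" ∈ p.2.map Prod.fst) ∧
    ("FOUND_ON_SERVER" ∈ p.2.map Prod.fst ∨ "FOUND_ON" ∈ p.2.map Prod.fst)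
instance (data : List (String × List (String × String))) : Decidable (Pre_update_json data) := by unfold Pre_update_json; infer_instance

def pvWitness_update_json : (List (String × List (String × String))) :=
  [("user1", [("ACCOUNT_STATUS", " "), ("FOUND_ON", "telegram")]),
   ("user2", [("ACCOUNT_TYPE", "Bots"), ("ACCOUNT_STATUS", "OK"), ("FOUND_ON", "discord"), ("FOUND_ON_SERVER", "S1")])]

def Spec_update_json (data : List (String × List (String × String))) (out : List (String × List (String × String))) : Prop := out = update_json_alt data
instance (data : List (String × List (String × String))) (out : List (String × List (String × String))) : Decidable (Spec_update_json data out) := by unfold Spec_update_json; infer_instance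

-- ===== CLAIM (what is proved, stated in full; the proofs are below) =====
def Claim_equal_update_json : Prop := ∀ (data : List (String × List (String × String))), Dom_update_json data → Pre_update_json data → Spec_update_json data (update_json data)


-- ===== LEMMAS AND PROOFS =====

-- one-pass injection of x right after the (unique) key `a`, as a flatMap
def pvInj (a : String) (x : String × String) (l : List (String × String)) : List (String × String) :=
  l.flatMap (fun p => p :: if p.1 == a then [x] else [])

def pvInjIf (b : Bool) (a : String) (x : String × String) (l : List (String × String)) : List (String × String) :=
  if b then pvInj a x l else l

def pvCompF (p : String × String) : String × String :=
  if p.1 == "ACCOUNT_STATUS" && PySem.Str.strip p.2 == "" then ("ACCOUNT_STATUS", "COMPROMISED") else p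

def pvComp (l : List (String × String)) : List (String × String) := l.map pvCompF

def pvG (nT nS : Bool) (p : String × String) : List (String × String) :=
  (p.1, if p.1 == "ACCOUNT_STATUS" && PySem.Str.strip p.2 == "" then "COMPROMISED" else p.2) ::
  ((if nT && p.1 == "ACCOUNT_STATUS" then [("ACCOUNT_TYPE", "User Accounts")] else []) ++
   (if nS && p.1 == "FOUND_ON" then [("FOUND_ON_SERVER", "ANONYMOUS_SERVER_2")] else []))

def pvFInj (b : Bool) (a : String) (x : String × String) (p : String × String) : List (String × String) :=
  p :: if b && p.1 == a then [x] else []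

theorem pv_update_mk (l acc : List (String × String))
    (h : ((acc ++ l).map Prod.fst).Nodup) :
    (PySem.Dict.mk acc).update l = PySem.Dict.mk (acc ++ l) := by
  induction l generalizing acc with
  | nil => simp [PySem.Dict.update]
  | cons p l ih =>
    have hd : (List.map Prod.fst acc ++ p.1 :: List.map Prod.fst l).Nodup := by
      simpa using h
    have hnp : p.1 ∉ acc.map Prod.fst := by
      have := (List.nodup_append.mp hd).2.2
      intro hm
      exact this p.1 hm p.1 (by simp) rfl
    have hnc : (PySem.Dict.mk acc).contains p.1 = false := by
      rw [PySem.Dict.contains_mk]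
      simp only [List.any_eq_false, beq_iff_eq]
      intro q hq hq1
      exact hnp (hq1 ▸ List.mem_map_of_mem hq)
    have hstep : (PySem.Dict.mk acc).insert p.1 p.2 = PySem.Dict.mk (acc ++ [p]) := by
      simp [PySem.Dict.insert, hnc]
    have h2 : (((acc ++ [p]) ++ l).map Prod.fst).Nodup := by
      simpa using h
    calc (PySem.Dict.mk acc).update (p :: l)
        = ((PySem.Dict.mk acc).insert p.1 p.2).update l := by
          simp [PySem.Dict.update]
      _ = (PySem.Dict.mk (acc ++ [p])).update l := by rw [hstep]
      _ = PySem.Dict.mk ((acc ++ [p]) ++ l) := ih _ h2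
      _ = PySem.Dict.mk (acc ++ p :: l) := by simp

theorem pv_ofList_nodup (l : List (String × String)) (h : (l.map Prod.fst).Nodup) :
    PySem.Dict.ofList l = PySem.Dict.mk l := by
  have := pv_update_mk l [] (by simpa using h)
  simpa [PySem.Dict.ofList, PySem.Dict.empty] using this

theorem pvInj_cons (a : String) (x p : String × String) (l : List (String × String)) :
    pvInj a x (p :: l) = (p :: if p.1 == a then [x] else []) ++ pvInj a x l := by
  simp [pvInj]

theorem pvInj_append (a : String) (x : String × String) (l₁ l₂ : List (String × String)) :
    pvInj a x (l₁ ++ l₂) = pvInj a x l₁ ++ pvInj a x l₂ := by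
  simp [pvInj]

theorem pvInj_id (a : String) (x : String × String) (l : List (String × String))
    (h : a ∉ l.map Prod.fst) : pvInj a x l = l := by
  induction l with
  | nil => rfl
  | cons p l ih =>
    simp only [List.map_cons, List.mem_cons] at h
    push_neg at h
    rw [pvInj_cons, if_neg (by simp [Ne.symm h.1]), ih h.2]
    simp

theorem pv_mem_keys_inj (a y : String) (x : String × String) (l : List (String × String)) :
    y ∈ (pvInj a x l).map Prod.fst ↔ y ∈ l.map Prod.fst ∨ (y = x.1 ∧ a ∈ l.map Prod.fst) := by
  induction l with
  | nil => simp [pvInj]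
  | cons p l ih =>
    rw [pvInj_cons]
    by_cases hp : p.1 = a
    · simp [hp, ih]
      tauto
    · simp [hp, ih]
      tauto

theorem pv_nodup_keys_inj (a : String) (x : String × String) (l : List (String × String))
    (h : (l.map Prod.fst).Nodup) (hx : x.1 ∉ l.map Prod.fst) (hxa : x.1 ≠ a) :
    ((pvInj a x l).map Prod.fst).Nodup := by
  induction l with
  | nil => simp [pvInj]
  | cons p l ih =>
    simp only [List.map_cons, List.nodup_cons] at h
    simp only [List.map_cons, List.mem_cons] at hx
    push_neg at hx
    rw [pvInj_cons]
    by_cases hp : p.1 = a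
    · have hal : a ∉ l.map Prod.fst := hp ▸ h.1
      rw [if_pos (by simp [hp]), pvInj_id a x l hal]
      simp only [List.cons_append, List.map_cons, List.nodup_cons,
        List.mem_cons]
      refine ⟨?_, ?_, h.2⟩
      · push_neg
        exact ⟨fun he => absurd (by rw [← he]; exact hp) hxa, h.1⟩
      · exact hx.2
    · rw [if_neg (by simp [hp])]
      simp only [List.cons_append, List.nil_append, List.map_cons, List.nodup_cons]
      refine ⟨?_, ih h.2 hx.2⟩
      rw [pv_mem_keys_inj]
      push_neg
      exact ⟨h.1, fun he => absurd he.symm hx.1⟩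

theorem pv_insert_eq_inj (a : String) (x : String × String) (l : List (String × String)) (i : Nat)
    (hnd : (l.map Prod.fst).Nodup)
    (hi : PySem.List.index? (l.map Prod.fst) a = some i) :
    PySem.List.insert l ((i : Int) + 1) x = pvInj a x l := by
  obtain ⟨preK, sufK, hsplit, hlen, hpre⟩ := (PySem.List.index?_eq_some_iff _ _ _).mp hi
  obtain ⟨pre, rest, hl, hpreK, hrest⟩ := List.map_eq_append_iff.mp hsplit
  obtain ⟨e, suf, hrest2, he, hsufK⟩ := List.map_eq_cons_iff.mp hrest
  subst hl hrest2
  have hlenp : pre.length = i := by rw [← hlen, ← hpreK]; simp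
  have hnotpre : a ∉ pre.map Prod.fst := by rw [← hpreK] at hpre; exact hpre
  have hnotsuf : a ∉ suf.map Prod.fst := by
    rw [hsplit] at hnd
    have := (List.nodup_append.mp hnd).2.1
    rw [List.nodup_cons] at this
    rw [hsufK]
    exact this.1
  have hcast : ((i : Int) + 1) = (((i + 1 : Nat)) : Int) := by push_cast; ring
  rw [hcast, PySem.List.insert_natCast _ _ _ (by simp; omega)]
  rw [pvInj_append, pvInj_cons, pvInj_id a x pre hnotpre, pvInj_id a x suf hnotsuf,
    if_pos (by simp [he])]
  have ht : List.take (i + 1) (pre ++ e :: suf) = pre ++ [e] := by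
    rw [← hlenp]
    simp [List.take_append]
  have hd : List.drop (i + 1) (pre ++ e :: suf) = suf := by
    rw [← hlenp]
    simp [List.drop_append]
  rw [ht, hd]
  simp

theorem pvFInj_false (a : String) (x : String × String) :
    pvFInj false a x = fun p => [p] := by
  funext p; simp [pvFInj]

theorem pvFInj_true (a : String) (x : String × String) :
    pvFInj true a x = fun p => p :: if p.1 == a then [x] else [] := by
  funext p; simp [pvFInj]

theorem pvInjIf_eq_flatMap (b : Bool) (a : String) (x : String × String) (l : List (String × String)) :
    pvInjIf b a x l = l.flatMap (pvFInj b a x) := by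
  cases b
  · simp [pvInjIf, pvFInj_false]
  · simp [pvInjIf, pvInj, pvFInj_true]

theorem pv_fusion_point (nT nS : Bool) (p : String × String) :
    ((pvFInj nT "ACCOUNT_STATUS" ("ACCOUNT_TYPE", "User Accounts") p).flatMap
      (pvFInj nS "FOUND_ON" ("FOUND_ON_SERVER", "ANONYMOUS_SERVER_2"))).map pvCompF
    = pvG nT nS p := by
  by_cases hS : p.1 = "ACCOUNT_STATUS" <;> by_cases hF : p.1 = "FOUND_ON"
  · rw [hS] at hF; exact absurd hF (by decide)
  all_goals cases nT <;> cases nS <;>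
    simp [pvFInj_false, pvFInj_true, pvFInj, pvG, pvCompF, hS, hF] <;>
    (try split) <;> simp_all [Prod.ext_iff]

theorem pv_fusion (nT nS : Bool) (l : List (String × String)) :
    pvComp (pvInjIf nS "FOUND_ON" ("FOUND_ON_SERVER", "ANONYMOUS_SERVER_2")
      (pvInjIf nT "ACCOUNT_STATUS" ("ACCOUNT_TYPE", "User Accounts") l)) =
    l.flatMap (pvG nT nS) := by
  rw [pvInjIf_eq_flatMap, pvInjIf_eq_flatMap, List.flatMap_assoc, pvComp, List.map_flatMap]
  exact List.flatMap_congr (fun p _ => pv_fusion_point nT nS p)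

theorem pvCompF_fst (p : String × String) : (pvCompF p).1 = p.1 := by
  simp only [pvCompF]
  split
  · next h => simp at h; simp [h.1]
  · rfl

theorem pv_keys_pvComp (l : List (String × String)) :
    (pvComp l).map Prod.fst = l.map Prod.fst := by
  rw [pvComp, List.map_map]
  exact List.map_congr_left (fun p _ => pvCompF_fst p)

theorem pv_any_key (l : List (String × String)) (k : String) :
    l.any (fun p => p.1 == k) = decide (k ∈ l.map Prod.fst) := by
  by_cases h : k ∈ l.map Prod.fst
  · obtain ⟨p, hp, hk⟩ := List.mem_map.mp h
    simp only [h, decide_true]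
    exact List.any_eq_true.mpr ⟨p, hp, by simp [hk]⟩
  · simp only [h, decide_false]
    rw [List.any_eq_false]
    intro p hp
    simp only [beq_iff_eq]
    intro hk
    exact h (hk ▸ List.mem_map_of_mem hp)

theorem pv_step3 (l : List (String × String)) (hnd : (l.map Prod.fst).Nodup) :
    (if (PySem.Dict.mk l).contains "ACCOUNT_STATUS" &&
        (PySem.Str.strip ((PySem.Dict.mk l).getD "ACCOUNT_STATUS" "") == "") then
      (PySem.Dict.mk l).insert "ACCOUNT_STATUS" "COMPROMISED"
    else PySem.Dict.mk l).items = pvComp l := by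
  have hkeys : (PySem.Dict.mk l).keys.Nodup := by rw [PySem.Dict.keys_mk]; exact hnd
  by_cases hc : ((PySem.Dict.mk l).contains "ACCOUNT_STATUS" &&
      (PySem.Str.strip ((PySem.Dict.mk l).getD "ACCOUNT_STATUS" "") == "")) = true
  · rw [if_pos hc]
    simp only [Bool.and_eq_true, beq_iff_eq] at hc
    rw [PySem.Dict.items_insert_of_contains _ _ hc.1]
    apply List.map_congr_left
    intro p hp
    by_cases hpS : p.1 = "ACCOUNT_STATUS"
    · have hmem : ("ACCOUNT_STATUS", p.2) ∈ (PySem.Dict.mk l).items := by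
        show ("ACCOUNT_STATUS", p.2) ∈ l
        rw [← hpS]
        exact hp
      have hgd := PySem.Dict.getD_of_mem_items _ hmem hkeys ""
      rw [hgd] at hc
      simp [pvCompF, hpS, hc.2]
    · simp [pvCompF, hpS]
  · rw [if_neg hc]
    show l = pvComp l
    rw [pvComp]
    refine Eq.symm ?_
    have hid : ∀ p ∈ l, pvCompF p = id p := ?_
    · rw [List.map_congr_left hid, List.map_id]
    intro p hp
    rw [pvCompF, id_eq]
    rw [if_neg ?_]
    simp only [Bool.and_eq_true, beq_iff_eq]
    rintro ⟨hpS, hstrip⟩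
    apply hc
    have hcont : (PySem.Dict.mk l).contains "ACCOUNT_STATUS" = true := by
      rw [PySem.Dict.contains_mk, pv_any_key]
      exact decide_eq_true (hpS ▸ List.mem_map_of_mem hp)
    have hmem : ("ACCOUNT_STATUS", p.2) ∈ (PySem.Dict.mk l).items := by
      show ("ACCOUNT_STATUS", p.2) ∈ l
      rw [← hpS]
      exact hp
    have hgd := PySem.Dict.getD_of_mem_items _ hmem hkeys ""
    rw [hcont, hgd]
    simp [hstrip]

theorem pv_nodup_injIf (b : Bool) (a : String) (x : String × String) (l : List (String × String))
    (h : (l.map Prod.fst).Nodup) (hx : b = true → x.1 ∉ l.map Prod.fst) (hxa : x.1 ≠ a) :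
    ((pvInjIf b a x l).map Prod.fst).Nodup := by
  cases b
  · exact h
  · exact pv_nodup_keys_inj a x l h (hx rfl) hxa

theorem pv_mem_keys_injIf (b : Bool) (a : String) (x : String × String) (l : List (String × String))
    (y : String) (hy : y ≠ x.1) :
    (y ∈ (pvInjIf b a x l).map Prod.fst) ↔ y ∈ l.map Prod.fst := by
  cases b
  · exact Iff.rfl
  · rw [pvInjIf]
    simp only [if_pos]
    rw [pv_mem_keys_inj]
    simp [hy]

theorem pv_stepIns (l : List (String × String)) (newk anchor v : String)
    (hnd : (l.map Prod.fst).Nodup) (hne : newk ≠ anchor)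
    (hor : newk ∈ l.map Prod.fst ∨ anchor ∈ l.map Prod.fst) :
    (if (PySem.Dict.mk l).contains newk then PySem.Dict.mk l
     else insert_field (PySem.Dict.mk l)
       (((PySem.List.index? (PySem.Dict.mk l).keys anchor).getD 0 : Int) + 1) newk v) =
    PySem.Dict.mk (pvInjIf (!(l.any (fun p => p.1 == newk))) anchor (newk, v) l) := by
  by_cases hc : l.any (fun p => p.1 == newk) = true
  · rw [if_pos (by rw [PySem.Dict.contains_mk]; exact hc), hc]
    rfl
  · have hc' : l.any (fun p => p.1 == newk) = false := by
      exact Bool.eq_false_iff.mpr hc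
    have hnew : newk ∉ l.map Prod.fst := by
      rw [pv_any_key] at hc'
      simpa using hc'
    have hanch : anchor ∈ l.map Prod.fst := hor.resolve_left hnew
    obtain ⟨i, hi⟩ := Option.isSome_iff_exists.mp
      ((PySem.List.index?_isSome_iff _ _).mpr hanch)
    rw [if_neg (by rw [PySem.Dict.contains_mk]; exact hc), insert_field, PySem.Dict.keys_mk, hi]
    show PySem.Dict.ofList (PySem.List.insert l ((i : Int) + 1) (newk, v)) = _
    rw [pv_insert_eq_inj anchor (newk, v) l i hnd hi,
      pv_ofList_nodup _ (pv_nodup_keys_inj anchor (newk, v) l hnd hnew hne), hc']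
    rfl

theorem pv_B_eq (det : List (String × String)) (nT nS : Bool)
    (hT : nT = !(det.any (fun p => p.1 == "ACCOUNT_TYPE")))
    (hS : nS = !(det.any (fun p => p.1 == "FOUND_ON_SERVER")))
    (hnd : ((det.flatMap (pvG nT nS)).map Prod.fst).Nodup) :
    updateItemsB det = det.flatMap (pvG nT nS) := by
  rw [updateItemsB]
  have hbody : (fun (items : List (String × String)) kv =>
      let v := if kv.1 == "ACCOUNT_STATUS" && PySem.Str.strip kv.2 == "" then "COMPROMISED" else kv.2
      let items := items ++ [(kv.1, v)]
      let items := if (!(det.any (fun p => p.1 == "ACCOUNT_TYPE"))) && kv.1 == "ACCOUNT_STATUS" then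
        items ++ [("ACCOUNT_TYPE", "User Accounts")] else items
      if (!(det.any (fun p => p.1 == "FOUND_ON_SERVER"))) && kv.1 == "FOUND_ON" then
        items ++ [("FOUND_ON_SERVER", "ANONYMOUS_SERVER_2")] else items)
      = fun items kv => items ++ pvG nT nS kv := by
    funext items kv
    simp only [pvG, ← hT, ← hS]
    split_ifs <;> simp
  rw [hbody, PySem.List.foldl_append_eq_flatMap, List.nil_append, pv_ofList_nodup _ hnd]

theorem pv_entry (det : List (String × String))
    (hnd : (det.map Prod.fst).Nodup)
    (hT : "ACCOUNT_TYPE" ∈ det.map Prod.fst ∨ "ACCOUNT_STATUS" ∈ det.map Prod.fst)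
    (hF : "FOUND_ON_SERVER" ∈ det.map Prod.fst ∨ "FOUND_ON" ∈ det.map Prod.fst) :
    (updateDetailsA (PySem.Dict.ofList det)).items = updateItemsB det := by
  have hl1 := pv_stepIns det "ACCOUNT_TYPE" "ACCOUNT_STATUS" "User Accounts" hnd (by decide) hT
  set nT := !(det.any (fun p => p.1 == "ACCOUNT_TYPE")) with hnT
  set l1 := pvInjIf nT "ACCOUNT_STATUS" ("ACCOUNT_TYPE", "User Accounts") det with hl1def
  have hnd1 : (l1.map Prod.fst).Nodup := by
    refine pv_nodup_injIf nT _ _ det hnd ?_ (by decide)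
    intro h
    have : det.any (fun p => p.1 == "ACCOUNT_TYPE") = false := by
      rw [hnT] at h
      simpa using h
    rw [pv_any_key] at this
    simpa using this
  have hFl1 : ("FOUND_ON_SERVER" ∈ l1.map Prod.fst ∨ "FOUND_ON" ∈ l1.map Prod.fst) := by
    rcases hF with h | h
    · exact Or.inl ((pv_mem_keys_injIf nT _ _ det _ (by decide)).mpr h)
    · exact Or.inr ((pv_mem_keys_injIf nT _ _ det _ (by decide)).mpr h)
  have hl2 := pv_stepIns l1 "FOUND_ON_SERVER" "FOUND_ON" "ANONYMOUS_SERVER_2" hnd1 (by decide) hFl1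
  have hanyFS : l1.any (fun p => p.1 == "FOUND_ON_SERVER") = det.any (fun p => p.1 == "FOUND_ON_SERVER") := by
    rw [pv_any_key, pv_any_key]
    congr 1
    rw [eq_iff_iff]
    exact pv_mem_keys_injIf nT _ _ det _ (by decide)
  set nS := !(det.any (fun p => p.1 == "FOUND_ON_SERVER")) with hnS
  rw [hanyFS] at hl2
  set l2 := pvInjIf nS "FOUND_ON" ("FOUND_ON_SERVER", "ANONYMOUS_SERVER_2") l1 with hl2def
  have hnd2 : (l2.map Prod.fst).Nodup := by
    refine pv_nodup_injIf nS _ _ l1 hnd1 ?_ (by decide)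
    intro h
    have : det.any (fun p => p.1 == "FOUND_ON_SERVER") = false := by
      rw [hnS] at h
      simpa using h
    rw [← hanyFS, pv_any_key] at this
    simpa using this
  have hA : (updateDetailsA (PySem.Dict.ofList det)).items = pvComp l2 := by
    rw [pv_ofList_nodup det hnd, updateDetailsA]
    simp only
    rw [hl1, hl2]
    exact pv_step3 l2 hnd2
  rw [hA]
  have hfus : pvComp l2 = det.flatMap (pvG nT nS) := by
    rw [hl2def, hl1def]
    exact pv_fusion nT nS det
  rw [hfus]
  refine (pv_B_eq det nT nS hnT hnS ?_).symm
  rw [← hfus, pv_keys_pvComp]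
  exact hnd2

-- ===== VERDICT (by name: the statement is the Claim_ definition above) =====
theorem update_json_spec : Claim_equal_update_json := by
  intro data _hdom hpre
  unfold Spec_update_json update_json update_json_alt
  apply List.map_congr_left
  intro p hp
  obtain ⟨h1, h2, h3⟩ := hpre.2 p hp
  rw [pv_entry p.2 h1 h2 h3]
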